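-- pv_equiv track=rewrite | github.com/TUIASI-AC-IoT/proiect-echipa-20 | mqtt_parser.py | parse_variable_byte_integer
-- ===== SOURCE A (Python) =====
-- def parse_variable_byte_integer(data):
--     """Parse a Variable Byte Integer."""
--     value = 0
--     multiplier = 1
--     bytes_read = 0
--     for byte in data:
--         value += (byte & 127) * multiplier
--         bytes_read += 1
--         if (byte & 128) == 0:
--             break
--         multiplier *= 128
--     return value, bytes_read
-- ===== SOURCE B (Python) =====
-- def parse_variable_byte_integer(data):
--     """Parse a Variable Byte Integer."""
--     groups = []
--     for byte in data:
--         groups.append(byte & 127)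
--         if (byte & 128) == 0:
--             break
--     value = sum(g * 128 ** i for i, g in enumerate(groups))
--     return value, len(groups)
-- ===== Notes on version B (the rewrite author's own statement) =====
-- stated objective: alternative
-- what changed: B separates byte collection (a loop gathering the 7-bit groups up to and including the terminator) from the numeric reduction (a positional sum over enumerate with base-128 weights), replacing A's single pass that threads a running multiplier.
import Mathlib
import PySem

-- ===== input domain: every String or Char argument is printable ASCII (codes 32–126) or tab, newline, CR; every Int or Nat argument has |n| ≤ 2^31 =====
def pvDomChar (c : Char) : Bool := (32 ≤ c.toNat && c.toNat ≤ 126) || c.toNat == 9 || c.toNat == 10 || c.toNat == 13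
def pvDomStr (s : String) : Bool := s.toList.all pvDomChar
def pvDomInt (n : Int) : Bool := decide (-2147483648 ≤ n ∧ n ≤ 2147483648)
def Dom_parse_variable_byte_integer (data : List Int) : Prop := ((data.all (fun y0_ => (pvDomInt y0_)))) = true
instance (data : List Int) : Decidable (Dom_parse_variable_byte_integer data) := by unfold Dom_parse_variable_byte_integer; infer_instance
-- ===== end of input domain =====

-- ===== PORT A =====
-- one honest line: B splits A's single accumulate-with-multiplier pass into collect-groups then a positional base-128 sum (alternative decomposition, same cost)
def pvbiLoopA : List Int → Int → Int → Int → Int × Int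
  | [], value, _, bytes_read => (value, bytes_read)
  | byte :: rest, value, multiplier, bytes_read =>
    let value := value + PySem.Int.band byte 127 * multiplier
    let bytes_read := bytes_read + 1
    if PySem.Int.band byte 128 = 0 then (value, bytes_read)
    else pvbiLoopA rest value (multiplier * 128) bytes_read

def parse_variable_byte_integer (data : List Int) : Int × Int :=
  pvbiLoopA data 0 1 0

-- ===== PORT B =====
-- collect: the for-loop appending (byte & 127) and breaking on the terminator
def pvbiCollect : List Int → List Int
  | [] => []
  | byte :: rest =>
    let g := PySem.Int.band byte 127
    if PySem.Int.band byte 128 = 0 then [g] else g :: pvbiCollect rest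

-- sum(g * 128 ** i for i, g in enumerate(groups)): index-carrying recursion over the groups
def pvbiSum : List Int → Nat → Int
  | [], _ => 0
  | g :: gs, i => g * 128 ^ i + pvbiSum gs (i + 1)

def parse_variable_byte_integer_alt (data : List Int) : Int × Int :=
  let groups := pvbiCollect data
  (pvbiSum groups 0, (groups.length : Int))

-- ===== PRECONDITION & SPEC =====
def Spec_parse_variable_byte_integer (data : List Int) (out : Int × Int) : Prop := out = parse_variable_byte_integer_alt data
instance (data : List Int) (out : Int × Int) : Decidable (Spec_parse_variable_byte_integer data out) := by unfold Spec_parse_variable_byte_integer; infer_instance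

-- ===== CLAIM (what is proved, stated in full; the proofs are below) =====
def Claim_equal_parse_variable_byte_integer : Prop := ∀ (data : List Int), Dom_parse_variable_byte_integer data → Spec_parse_variable_byte_integer data (parse_variable_byte_integer data)

-- ===== LEMMAS AND PROOFS =====

-- ===== VERDICT (by name: the statement is the Claim_ definition above) =====
lemma pvbiSum_succ (gs : List Int) (i : Nat) :
    pvbiSum gs (i + 1) = 128 * pvbiSum gs i := by
  induction gs generalizing i with
  | nil => simp [pvbiSum]
  | cons g gs ih => simp [pvbiSum, ih]; ring

lemma pvbiLoopA_eq (data : List Int) (v m br : Int) :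
    pvbiLoopA data v m br =
      (v + m * pvbiSum (pvbiCollect data) 0, br + (pvbiCollect data).length) := by
  induction data generalizing v m br with
  | nil => simp [pvbiLoopA, pvbiCollect, pvbiSum]
  | cons byte rest ih =>
    simp only [pvbiLoopA, pvbiCollect]
    split
    · simp [pvbiSum]; ring
    · rw [ih]
      simp [pvbiSum, pvbiSum_succ]
      constructor
      · ring
      · ring

-- ===== VERDICT =====
theorem parse_variable_byte_integer_spec : Claim_equal_parse_variable_byte_integer := by
  intro data _
  unfold Spec_parse_variable_byte_integer parse_variable_byte_integer parse_variable_byte_integer_alt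
  rw [pvbiLoopA_eq]
  simp
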